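-- pv_equiv track=rewrite | github.com/YamenHabib/Algorithms-in-bioinformatics-Fall-2021 | Find a Median String/run.py | cal_min_kmer_dna
-- ===== SOURCE A (Python) =====
-- def get_kmer_for_dna(dna, k):
--     k_mers = []
--     for i in range(len(dna)-(k-1)):
--         k_mer= dna[i:i+k]
--         k_mers.append(k_mer)
--     return k_mers
--
-- def hamming_distance(s1, s2):
--     return sum(c1 != c2 for c1, c2 in zip(s1, s2))
--
-- def cal_min_kmer_dna(kmer, dna, k):
--     d= 100000
--     patterns= get_kmer_for_dna(dna, k)
--     for p_ in patterns:
--         lc= hamming_distance(kmer, p_)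
--         if lc < d:
--             d = lc
--     return d
-- ===== SOURCE B (Python) =====
-- def cal_min_kmer_dna(kmer, dna, k):
--     # Column-wise sweep: one mismatch-count per window, updated offset by offset,
--     # instead of re-scanning each window separately.
--     w = len(dna) - (k - 1)
--     counts = [0] * max(w, 0)
--     for j in range(min(len(kmer), k)):
--         counts = [c + (dna[i + j] != kmer[j]) for i, c in enumerate(counts)]
--     best = 100000
--     for c in counts:
--         best = min(best, c)
--     return best
-- ===== Notes on version B (the rewrite author's own statement) =====
-- stated objective: alternative
-- what changed: B replaces A's row-wise scan (build every k-length window, then recompute its Hamming distance from scratch) by a column-wise sweep that keeps one mismatch counter per window and updates all counters per kmer offset, then takes the minimum of the counter array.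
import Mathlib
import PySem

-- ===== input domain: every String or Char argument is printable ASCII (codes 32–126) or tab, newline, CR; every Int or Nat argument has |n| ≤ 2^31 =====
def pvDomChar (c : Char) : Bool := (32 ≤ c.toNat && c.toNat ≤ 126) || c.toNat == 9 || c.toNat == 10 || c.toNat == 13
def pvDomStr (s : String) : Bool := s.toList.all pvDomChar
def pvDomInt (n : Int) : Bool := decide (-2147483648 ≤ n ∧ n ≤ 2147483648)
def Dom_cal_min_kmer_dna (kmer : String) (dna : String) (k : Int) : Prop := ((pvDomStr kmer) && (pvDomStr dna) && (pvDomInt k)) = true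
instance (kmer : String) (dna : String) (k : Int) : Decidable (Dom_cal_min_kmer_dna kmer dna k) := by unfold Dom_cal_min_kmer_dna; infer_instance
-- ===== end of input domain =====

-- B replaces A's per-window hamming-distance rescans by a single column-wise sweep
-- maintaining one mismatch count per window; alternative algorithm, same results.

-- ===== PORT A =====
def get_kmer_for_dna (dna : List Char) (k : Int) : List (List Char) :=
  (PySem.List.pyRange 0 ((dna.length : Int) - (k - 1)) 1).foldl
    (fun acc i => acc ++ [PySem.List.slice dna (some i) (some (i + k))]) []

def hamming_distance (s1 s2 : List Char) : Int :=
  (s1.zip s2).foldl (fun s p => s + (if p.1 ≠ p.2 then 1 else 0)) 0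

def cal_min_kmer_dna (kmer : String) (dna : String) (k : Int) : Int :=
  (get_kmer_for_dna dna.toList k).foldl
    (fun d p => let lc := hamming_distance kmer.toList p; if lc < d then lc else d) 100000

-- ===== PORT B =====
-- the indices i + j and j are in range whenever the loops run, so the Option-valued
-- pyGet? comparison is exactly Python's dna[i + j] != kmer[j]
def cal_min_kmer_dna_alt (kmer : String) (dna : String) (k : Int) : Int :=
  let K := kmer.toList
  let D := dna.toList
  let w : Int := (D.length : Int) - (k - 1)
  let counts0 : List Int := List.replicate (max w 0).toNat 0
  let counts := (PySem.List.pyRange 0 (min (K.length : Int) k) 1).foldl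
    (fun counts j => (PySem.List.enumerate counts).map
      (fun ic => ic.2 + (if PySem.List.pyGet? D (ic.1 + j) ≠ PySem.List.pyGet? K j then 1 else 0)))
    counts0
  counts.foldl (fun best c => min best c) 100000

-- ===== PRECONDITION & SPEC =====
def Spec_cal_min_kmer_dna (kmer : String) (dna : String) (k : Int) (out : Int) : Prop := out = cal_min_kmer_dna_alt kmer dna k
instance (kmer : String) (dna : String) (k : Int) (out : Int) : Decidable (Spec_cal_min_kmer_dna kmer dna k out) := by unfold Spec_cal_min_kmer_dna; infer_instance

-- ===== CLAIM (what is proved, stated in full; the proofs are below) =====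
def Claim_equal_cal_min_kmer_dna : Prop := ∀ (kmer : String) (dna : String) (k : Int), Dom_cal_min_kmer_dna kmer dna k → Spec_cal_min_kmer_dna kmer dna k (cal_min_kmer_dna kmer dna k)

-- ===== LEMMAS AND PROOFS =====

-- B's mismatch test at window i, offset j
def pvMis (D K : List Char) (i j : Int) : Bool :=
  decide (PySem.List.pyGet? D (i + j) ≠ PySem.List.pyGet? K j)

-- mismatch count of window i over the first m offsets
def pvCnt (D K : List Char) (i : Int) (m : Nat) : Int :=
  ((List.range m).countP (fun (j : Nat) => pvMis D K i (j : Int)) : Int)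

-- B's loop body
def pvStep (D K : List Char) (counts : List Int) (j : Int) : List Int :=
  (PySem.List.enumerate counts).map
    (fun ic => ic.2 + (if PySem.List.pyGet? D (ic.1 + j) ≠ PySem.List.pyGet? K j then 1 else 0))

lemma pv_if_min (d lc : Int) : (if lc < d then lc else d) = min d lc := by
  split_ifs with h <;> omega

lemma pvCnt_succ (D K : List Char) (i : Int) (m : Nat) :
    pvCnt D K i (m + 1) = pvCnt D K i m
      + (if PySem.List.pyGet? D (i + (m : Int)) ≠ PySem.List.pyGet? K (m : Int) then 1 else 0) := by
  simp [pvCnt, List.range_succ, List.countP_append, pvMis, List.countP_cons]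

lemma pv_enum_map {α β : Type} (f : α → β) :
    ∀ (l : List α) (s : Int),
      PySem.List.enumerate (l.map f) s = (PySem.List.enumerate l s).map (fun p => (p.1, f p.2)) := by
  intro l
  induction l with
  | nil => intro s; simp [PySem.List.enumerate_nil]
  | cons x t ih => intro s; simp [PySem.List.enumerate_cons, ih]

lemma pv_enum_range : ∀ (W : Nat),
    PySem.List.enumerate (List.range W) 0
      = (List.range W).map (fun (i : Nat) => (((i : Int), i) : Int × Nat)) := by
  intro W
  induction W with
  | zero => simp
  | succ n ih => simp [List.range_succ, PySem.List.enumerate_append, ih, PySem.List.enumerate_cons]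

lemma pvStep_map_range (D K : List Char) (W : Nat) (f : Nat → Int) (j : Int) :
    pvStep D K ((List.range W).map f) j
      = (List.range W).map (fun i => f i
          + (if PySem.List.pyGet? D ((i : Int) + j) ≠ PySem.List.pyGet? K j then 1 else 0)) := by
  rw [pvStep, pv_enum_map, pv_enum_range, List.map_map, List.map_map]; rfl

lemma pvLoop (D K : List Char) (W : Nat) : ∀ (m : Nat),
    (PySem.List.pyRange 0 (m : Int) 1).foldl (pvStep D K) (List.replicate W 0)
      = (List.range W).map (fun (i : Nat) => pvCnt D K (i : Int) m) := by
  intro m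
  induction m with
  | zero =>
      rw [PySem.List.pyRange_one_eq_nil (by omega)]
      simp [pvCnt]
  | succ n ih =>
      have h1 : ((n + 1 : Nat) : Int) = (n : Int) + 1 := by push_cast; ring
      rw [h1, PySem.List.pyRange_one_succ_right (by omega), List.foldl_append]
      simp only [List.foldl_cons, List.foldl_nil, ih]
      rw [pvStep_map_range]
      apply List.map_congr_left
      intro i _
      rw [pvCnt_succ]

lemma pvStep_fold_nil (D K : List Char) : ∀ (l : List Int),
    l.foldl (pvStep D K) [] = [] := by
  intro l
  induction l with
  | nil => rfl
  | cons x t ih => simpa [pvStep, PySem.List.enumerate_nil] using ih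

lemma pv_ham_eq_countP (A B : List Char) :
    hamming_distance A B = ((A.zip B).countP (fun p => decide (p.1 ≠ p.2)) : Int) := by
  rw [hamming_distance, PySem.List.foldl_add (A.zip B) (fun p => if p.1 ≠ p.2 then 1 else 0) 0]
  rw [show (fun (p : Char × Char) => if p.1 ≠ p.2 then (1:Int) else 0)
        = (fun p => if (fun (q : Char × Char) => decide (q.1 ≠ q.2)) p = true then (1:Int) else 0) by
      funext p; by_cases h : p.1 = p.2 <;> simp [h]]
  rw [PySem.List.sum_map_ite_one_zero]
  simp

lemma pv_countP_zip : ∀ (A B : List Char),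
    (A.zip B).countP (fun p => decide (p.1 ≠ p.2))
      = (List.range (min A.length B.length)).countP (fun j => decide (A[j]? ≠ B[j]?)) := by
  intro A
  induction A with
  | nil => intro B; simp
  | cons a A' ih =>
      intro B
      cases B with
      | nil => simp
      | cons b B' =>
          simp only [List.zip_cons_cons, List.countP_cons, ih, List.length_cons]
          have hmin : min (A'.length + 1) (B'.length + 1) = min A'.length B'.length + 1 := by omega
          rw [hmin, List.range_succ_eq_map, List.countP_cons, List.countP_map]
          have hfun : ((fun (j : Nat) => decide ¬((a :: A')[j]? = (b :: B')[j]?)) ∘ Nat.succ)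
              = (fun (j : Nat) => decide ¬(A'[j]? = B'[j]?)) := by
            funext j; simp
          rw [hfun]
          by_cases h : a = b <;> simp [h]

lemma pv_ham_nonneg (A B : List Char) : 0 ≤ hamming_distance A B := by
  rw [pv_ham_eq_countP]; exact Int.natCast_nonneg _

lemma pv_foldl_min_replicate0 : ∀ (t : Nat), (List.replicate t (0:Int)).foldl min 0 = 0 := by
  intro t
  induction t with
  | zero => rfl
  | succ n ih => simpa [List.replicate_succ] using ih

-- the per-window identity: A's hamming distance of window i equals B's column count
lemma pv_window (D K : List Char) (k : Int) (t : Nat)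
    (hk : 1 ≤ k) (ht : (t : Int) + k ≤ (D.length : Int)) :
    hamming_distance K (PySem.List.slice D (some (t : Int)) (some ((t : Int) + k)))
      = pvCnt D K (t : Int) (min K.length k.toNat) := by
  have h0k : (0:Int) ≤ (t : Int) + k := by omega
  rw [PySem.List.slice_toNat D (a := (t : Int)) (b := (t : Int) + k) (by omega) h0k]
  have htk : ((t : Int) + k).toNat = t + k.toNat := by omega
  rw [htk]
  simp only [Int.toNat_natCast]
  have hsub : t + k.toNat - t = k.toNat := by omega
  rw [hsub]
  set Wt := (D.drop t).take k.toNat with hWt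
  have hlen : Wt.length = k.toNat := by
    simp [hWt]
    omega
  rw [pv_ham_eq_countP, pv_countP_zip, hlen]
  rw [pvCnt]
  congr 1
  apply List.countP_congr
  intro j hj
  have hjlt : j < min K.length k.toNat := List.mem_range.mp hj
  have hjk : j < k.toNat := by omega
  have hWtj : Wt[j]? = D[t + j]? := by
    rw [hWt, List.getElem?_take_of_lt hjk, List.getElem?_drop]
  have h1 : PySem.List.pyGet? D ((t : Int) + (j : Int)) = D[t + j]? := by
    have hc : ((t : Int) + (j : Int)) = ((t + j : Nat) : Int) := by push_cast; ring
    rw [hc, PySem.List.pyGet?_natCast]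
  have h2 : PySem.List.pyGet? K (j : Int) = K[j]? := PySem.List.pyGet?_natCast K j
  simp only [pvMis, h1, h2, hWtj, decide_eq_true_eq]
  exact ne_comm

theorem cal_min_kmer_dna_spec_aux (kmer dna : String) (k : Int) :
    cal_min_kmer_dna kmer dna k = cal_min_kmer_dna_alt kmer dna k := by
  set K := kmer.toList with hK
  set D := dna.toList with hD
  set n : Int := (D.length : Int) with hn
  set w : Int := n - (k - 1) with hw
  have hstep : (fun (counts : List Int) (j : Int) => (PySem.List.enumerate counts).map
      (fun ic => ic.2 + (if PySem.List.pyGet? D (ic.1 + j) ≠ PySem.List.pyGet? K j then 1 else 0)))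
      = pvStep D K := rfl
  rw [cal_min_kmer_dna, cal_min_kmer_dna_alt, get_kmer_for_dna]
  simp only [← hK, ← hD, ← hn, ← hw, hstep]
  rw [PySem.List.foldl_append_singleton_eq_map]
  simp only [List.nil_append]
  rw [PySem.List.foldl_congr_mem _ _ (fun d p => min d (hamming_distance K p)) _
      (by intro acc x _; exact pv_if_min acc (hamming_distance K x))]
  rw [← List.foldl_map (f := fun p => hamming_distance K p) (g := min)]
  rw [List.map_map]
  rw [show (fun (best c : Int) => min best c) = min from rfl]
  by_cases hwpos : 0 < w
  · -- there is at least one window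
    have hmax : max w 0 = w := by omega
    rw [hmax]
    by_cases hk : 1 ≤ k
    · -- main case: compare window t's distance with column count t, pointwise
      set L : Int := min (K.length : Int) k with hL
      have hLnat : L = ((L.toNat : Nat) : Int) := by omega
      rw [hLnat, pvLoop]
      have hwnat : w = ((w.toNat : Nat) : Int) := by omega
      rw [hwnat, PySem.List.pyRange_zero_nat, List.map_map]
      simp only [Int.toNat_natCast]
      congr 1
      apply List.map_congr_left
      intro t htm
      have htW : t < w.toNat := List.mem_range.mp htm
      have hLk : L.toNat = min K.length k.toNat := by omega
      show hamming_distance K (PySem.List.slice D (some (t : Int)) (some ((t : Int) + k)))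
          = pvCnt D K (t : Int) L.toNat
      rw [hLk]
      exact pv_window D K k t hk (by omega)
    · -- k ≤ 0 : every column loop is empty (B) and some window is empty (A); both sides are 0
      have hkn : k ≤ 0 := by omega
      have hLneg : min (K.length : Int) k ≤ 0 := by omega
      rw [PySem.List.pyRange_one_eq_nil hLneg]
      simp only [List.foldl_nil]
      obtain ⟨t, hwt⟩ : ∃ t, w.toNat = t + 1 := ⟨w.toNat - 1, by omega⟩
      have hB : (List.replicate w.toNat (0:Int)).foldl min 100000 = 0 := by
        rw [hwt, List.replicate_succ, List.foldl_cons,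
            show min (100000:Int) 0 = 0 from rfl, pv_foldl_min_replicate0]
      rw [hB]
      set l' := (PySem.List.pyRange 0 w 1).map
          ((fun p => hamming_distance K p) ∘ fun i => PySem.List.slice D (some i) (some (i + k)))
        with hl'
      have hzero : hamming_distance K (PySem.List.slice D (some (-k)) (some (-k + k))) = 0 := by
        rw [show -k + k = (0:Int) by ring,
            PySem.List.slice_toNat D (a := -k) (b := (0:Int)) (by omega) (by omega)]
        simp [hamming_distance]
      have hub : l'.foldl min 100000 ≤ 0 := by
        have hmem : (-k) ∈ PySem.List.pyRange 0 w 1 := by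
          rw [PySem.List.mem_pyRange_one]
          constructor <;> omega
        have h3 := (PySem.List.foldl_min_le l' 100000).2 _
          (List.mem_map_of_mem (f := (fun p => hamming_distance K p) ∘
              fun i => PySem.List.slice D (some i) (some (i + k))) hmem)
        simp only [Function.comp] at h3
        rw [hzero] at h3
        exact h3
      have hlb : 0 ≤ l'.foldl min 100000 := by
        rcases PySem.List.foldl_min_mem l' 100000 with h | h
        · omega
        · rw [hl'] at h
          obtain ⟨i, _, hi⟩ := List.mem_map.mp h
          rw [← hi]
          exact pv_ham_nonneg _ _
      omega
  · -- no window at all: both folds are over empty data and return 100000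
    rw [PySem.List.pyRange_one_eq_nil (by omega)]
    have hmax : (max w 0).toNat = 0 := by omega
    rw [hmax]
    simp only [List.replicate_zero, List.map_nil, List.foldl_nil]
    rw [pvStep_fold_nil]
    rfl

-- ===== VERDICT (by name: the statement is the Claim_ definition above) =====
theorem cal_min_kmer_dna_spec : Claim_equal_cal_min_kmer_dna := by
  intro kmer dna k _
  exact cal_min_kmer_dna_spec_aux kmer dna k
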